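-- pv_equiv track=rewrite | github.com/penguin138/python_tasks | home_work_4/task_a.py | language
-- ===== SOURCE A (Python) =====
-- def language(word, languages):
--     letters = {}
--     for letter in word:
--         for lang in sorted(languages.keys()):
--             if letter in languages[lang]:
--                 letters[letter] = lang
--                 break
--     langs_used = {}
--     for letter, lang in letters.items():
--         if lang in langs_used:
--             langs_used[lang] += 1
--         else:
--             langs_used[lang] = 1
--     sorted_langs = sorted(langs_used.items())
--     if sorted_langs:
--         return max(sorted(langs_used.items()), key=lambda x: x[1])[0]
--     return ""
-- ===== SOURCE B (Python) =====
-- def language(word, languages):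
--     best_lang, best_count = '', 0
--     claimed = set()
--     word_set = set(word)
--     for lang in sorted(languages):
--         owned = (word_set & set(languages[lang])) - claimed
--         claimed |= owned
--         if len(owned) > best_count:
--             best_lang, best_count = lang, len(owned)
--     return best_lang
-- ===== Notes on version B (the rewrite author's own statement) =====
-- stated objective: faster
-- what changed: Instead of scanning the alphabetically sorted language list once per letter of the word (re-sorting the keys every iteration), B sorts the languages once and makes a single pass over them, claiming each language's still-unclaimed letters of the word with set operations while keeping a running best (lang, count).
import Mathlib
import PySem

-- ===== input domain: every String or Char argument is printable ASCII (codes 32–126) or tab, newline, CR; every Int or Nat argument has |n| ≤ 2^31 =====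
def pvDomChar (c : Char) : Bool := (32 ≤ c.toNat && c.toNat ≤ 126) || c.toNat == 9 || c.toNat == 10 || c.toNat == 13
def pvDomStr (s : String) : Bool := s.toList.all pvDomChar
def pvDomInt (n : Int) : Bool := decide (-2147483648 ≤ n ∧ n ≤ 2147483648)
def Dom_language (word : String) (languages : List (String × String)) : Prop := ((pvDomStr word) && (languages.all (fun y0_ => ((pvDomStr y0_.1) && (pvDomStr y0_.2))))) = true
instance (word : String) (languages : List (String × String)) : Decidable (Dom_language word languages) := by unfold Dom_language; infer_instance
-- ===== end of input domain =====

-- B replaces A's per-letter scan over the sorted language list by a single pass over the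
-- sorted languages that claims each language's still-unclaimed letters with set operations
-- and keeps a running best (objective: faster).


-- ===== PORT A =====
-- inner loop 'for lang in sorted(languages.keys()): if letter in languages[lang]: …; break'
-- (lang is drawn from the dict's own keys, so languages[lang] never raises: getD "" is exact)
def langFirst (d : PySem.Dict String String) (letter : Char) : List String → Option String
  | [] => none
  | l :: rest =>
      if (d.getD l "").toList.contains letter then some l else langFirst d letter rest

def language (word : String) (languages : List (String × String)) : String :=
  let d := PySem.Dict.ofList languages
  let sortedKeys := PySem.List.sorted d.keys (fun x => x) false
  let letters : PySem.Dict Char String :=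
    word.toList.foldl (fun lt letter =>
      match langFirst d letter sortedKeys with
      | some lang => lt.insert letter lang
      | none => lt) PySem.Dict.empty
  let langsUsed : PySem.Dict String Int :=
    letters.items.foldl (fun lu p =>
      if lu.contains p.2 then lu.insert p.2 (lu.getD p.2 0 + 1) else lu.insert p.2 1)
      PySem.Dict.empty
  let sortedLangs := PySem.List.sorted2 langsUsed.items (fun x => x.1) (fun x => x.2) false
  if sortedLangs ≠ [] then
    match PySem.List.max? (PySem.List.sorted2 langsUsed.items (fun x => x.1) (fun x => x.2) false)
        (fun x => x.2) with
    | some p => p.1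
    | none => ""   -- unreachable: max of a nonempty list
  else ""

-- ===== PORT B =====
def language_alt (word : String) (languages : List (String × String)) : String :=
  let d := PySem.Dict.ofList languages
  let wordSet : PySem.Set Char := PySem.Set.ofList word.toList
  let res := (PySem.List.sorted d.keys (fun x => x) false).foldl
    (fun (st : String × Int × PySem.Set Char) lang =>
      let owned := PySem.Set.diff
        (PySem.Set.inter wordSet (PySem.Set.ofList (d.getD lang "").toList)) st.2.2
      let claimed := PySem.Set.union st.2.2 owned
      if PySem.Set.len owned > st.2.1 then (lang, PySem.Set.len owned, claimed)
      else (st.1, st.2.1, claimed))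
    ("", 0, PySem.Set.empty)
  res.1

-- ===== PRECONDITION & SPEC =====
def Spec_language (word : String) (languages : List (String × String)) (out : String) : Prop := out = language_alt word languages
instance (word : String) (languages : List (String × String)) (out : String) : Decidable (Spec_language word languages out) := by unfold Spec_language; infer_instance

-- ===== CLAIM (what is proved, stated in full; the proofs are below) =====
def Claim_equal_language : Prop := ∀ (word : String) (languages : List (String × String)), Dom_language word languages → Spec_language word languages (language word languages)

-- ===== LEMMAS AND PROOFS =====

-- langFirst is List.find?
theorem langFirst_eq_find? (d : PySem.Dict String String) (c : Char) (ks : List String) :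
    langFirst d c ks = ks.find? (fun l => (d.getD l "").toList.contains c) := by
  induction ks with
  | nil => rfl
  | cons l rest ih => simp only [langFirst, List.find?]; split_ifs with h <;> simp_all

-- insertBy only looks at 'before x y' for y in the list
theorem insertBy_congr {α : Type} (b1 b2 : α → α → Bool) (x : α) (ys : List α)
    (h : ∀ y ∈ ys, b1 x y = b2 x y) :
    PySem.List.insertBy b1 x ys = PySem.List.insertBy b2 x ys := by
  induction ys with
  | nil => rfl
  | cons y ys ih =>
      simp only [PySem.List.insertBy]
      rw [h y (by simp)]
      split_ifs with hb
      · rfl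
      · rw [ih (fun z hz => h z (by simp [hz]))]

-- an insertion-sort fold only compares elements of the input
theorem foldl_insertBy_congr {α : Type} (b1 b2 : α → α → Bool) :
    ∀ (xs acc : List α),
    (∀ x ∈ xs, ∀ y, (y ∈ acc ∨ y ∈ xs) → b1 x y = b2 x y) →
    xs.foldl (fun acc x => PySem.List.insertBy b1 x acc) acc
      = xs.foldl (fun acc x => PySem.List.insertBy b2 x acc) acc := by
  intro xs
  induction xs with
  | nil => intro acc _; rfl
  | cons x xs ih =>
      intro acc h
      simp only [List.foldl_cons]
      rw [insertBy_congr b1 b2 x acc (fun y hy => h x (by simp) y (Or.inl hy))]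
      exact ih _ (fun z hz y hy => by
        rcases hy with hy | hy
        · rw [PySem.List.insertBy_mem_iff] at hy
          rcases hy with rfl | hy
          · exact h z (by simp [hz]) y (Or.inr (by simp))
          · exact h z (by simp [hz]) y (Or.inl hy)
        · exact h z (by simp [hz]) y (Or.inr (by simp [hy])))

-- sorted with a tuple key = sorted by the first key, when the first key separates the elements
theorem sorted2_eq_sorted {α κ₁ κ₂ : Type} [LinearOrder κ₁] [LinearOrder κ₂]
    (xs : List α) (k1 : α → κ₁) (k2 : α → κ₂)
    (h : ∀ x ∈ xs, ∀ y ∈ xs, k1 x = k1 y → x = y) :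
    PySem.List.sorted2 xs k1 k2 false = PySem.List.sorted xs k1 false := by
  simp only [PySem.List.sorted2, PySem.List.sorted]
  apply foldl_insertBy_congr
  intro x hx y hy
  rcases hy with hy | hy
  · simp at hy
  · by_cases hxy : k1 x = k1 y
    · have : x = y := h x hx y hy hxy
      subst this
      simp
    · rcases lt_or_gt_of_ne hxy with hlt | hgt
      · simp [hlt, not_lt_of_gt hlt]
      · simp [hgt, not_lt_of_gt hgt]

-- a fold of inserts whose value is a function of the key, over a dict of the same shape
theorem items_foldl_insert_fun (h : Char → String) :
    ∀ (l : List Char) (S : List Char), S.Nodup →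
    ((l.foldl (fun d c => d.insert c (h c))
        (PySem.Dict.mk (S.map fun c => (c, h c)))).items)
      = (PySem.Set.update S l).map (fun c => (c, h c)) := by
  intro l
  induction l with
  | nil => intro S _; simp [PySem.Set.update]
  | cons c l ih =>
      intro S hS
      simp only [List.foldl_cons]
      have hupd : PySem.Set.update S (c :: l) = PySem.Set.update (PySem.Set.add S c) l := by
        simp [PySem.Set.update]
      by_cases hc : c ∈ S
      · have hcont : (PySem.Dict.mk (S.map fun c => (c, h c))).contains c = true := by
          simp [PySem.Dict.contains_mk, List.any_map]
          exact hc
        have : (PySem.Dict.mk (S.map fun c => (c, h c))).insert c (h c)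
            = PySem.Dict.mk (S.map fun c => (c, h c)) := by
          apply PySem.Dict.ext
          rw [PySem.Dict.items_insert_of_contains _ _ hcont]
          simp only [List.map_map]
          apply List.map_congr_left
          intro a _
          by_cases hac : a = c <;> simp [hac]
        rw [this, hupd, show PySem.Set.add S c = S from by simp [PySem.Set.add, hc]]
        exact ih S hS
      · have hne : ∀ x ∈ S, ¬x = c := fun x hx hxc => hc (hxc ▸ hx)
        have hcont : (PySem.Dict.mk (S.map fun c => (c, h c))).contains c = false := by
          simp [PySem.Dict.contains_mk, List.any_map]
          exact hne
        have : (PySem.Dict.mk (S.map fun c => (c, h c))).insert c (h c)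
            = PySem.Dict.mk ((S ++ [c]).map fun c => (c, h c)) := by
          apply PySem.Dict.ext
          rw [PySem.Dict.items_insert_of_not_contains _ _ hcont]
          simp
        rw [this, hupd, show PySem.Set.add S c = S ++ [c] from by
          simp [PySem.Set.add]
          exact hc]
        exact ih (S ++ [c]) (by simp [List.nodup_append, hS]; exact hne)

-- pure best-scan step
def pvStep (g : String → Int) (s : String × Int) (L : String) : String × Int :=
  if g L > s.2 then (L, g L) else s

-- which letters a language picks up, given the claimed-set invariant
theorem owned_char (d : PySem.Dict String String) (ks p rest' : List String) (L : String)
    (hks : ks.Nodup) (hsplit : ks = p ++ L :: rest')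
    (claimed : PySem.Set Char) (W0 : PySem.Set Char)
    (hcl : ∀ c, c ∈ claimed ↔ c ∈ W0 ∧ ∃ l ∈ p, langFirst d c ks = some l)
    (c : Char) (hcW : c ∈ W0) :
    (((PySem.Set.ofList (d.getD L "").toList).contains c) && !(claimed.contains c))
      = (langFirst d c ks == some L) := by
  have hLp : L ∉ p := fun hLp =>
    (List.disjoint_of_nodup_append (hsplit ▸ hks)) hLp (by simp)
  have hq1 : ((PySem.Set.ofList (d.getD L "").toList).contains c = true)
      ↔ c ∈ (d.getD L "").toList := by
    simp [PySem.Set.contains, PySem.Set.mem_ofList]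
  have hq2 : (claimed.contains c = true) ↔ ∃ l ∈ p, langFirst d c ks = some l := by
    simp only [PySem.Set.contains, List.contains_iff_mem, hcl]
    exact ⟨fun h => h.2, fun h => ⟨hcW, h⟩⟩
  rw [langFirst_eq_find?]
  by_cases h1 : c ∈ (d.getD L "").toList
  · by_cases h2 : ∃ l ∈ p, langFirst d c ks = some l
    · -- already claimed by an earlier language, which cannot be L
      have hne : ¬ (ks.find? (fun l => (d.getD l "").toList.contains c) = some L) := by
        rcases h2 with ⟨l, hl, hfl⟩
        rw [langFirst_eq_find?] at hfl
        intro hContra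
        rw [hContra] at hfl
        exact hLp (Option.some.inj hfl ▸ hl)
      have hcc : c ∈ claimed := (hcl c).mpr ⟨hcW, h2⟩
      simp only [List.contains_eq_mem] at hne ⊢
      simp [h1, hcc, hne]
    · -- unclaimed and present: L is the first matching language
      have hfp : p.find? (fun l => (d.getD l "").toList.contains c) = none := by
        cases hp : p.find? (fun l => (d.getD l "").toList.contains c) with
        | none => rfl
        | some l =>
            exfalso
            apply h2
            refine ⟨l, List.mem_of_find?_eq_some hp, ?_⟩
            rw [langFirst_eq_find?, hsplit, List.find?_append, hp]
            rfl
      have : ks.find? (fun l => (d.getD l "").toList.contains c) = some L := by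
        rw [hsplit, List.find?_append, hfp]
        simp [h1]
      have hnc : c ∉ claimed := fun hb => h2 ((hcl c).mp hb).2
      simp only [List.contains_eq_mem] at this ⊢
      simp [h1, hnc, this]
  · -- the language does not contain the letter at all, and find? cannot return L
    have hne : ¬ (ks.find? (fun l => (d.getD l "").toList.contains c) = some L) := by
      intro hContra
      have := List.find?_some hContra
      simp at this
      exact h1 this
    simp only [List.contains_eq_mem] at hne ⊢
    simp [h1, hne]

-- the B fold, with the claimed set tracked by an invariant
theorem alt_fold_eq (d : PySem.Dict String String) (W0 : PySem.Set Char) (ks : List String)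
    (hks : ks.Nodup) :
    ∀ (rest p : List String) (st : String × Int × PySem.Set Char),
    ks = p ++ rest →
    (∀ c, c ∈ st.2.2 ↔ c ∈ W0 ∧ ∃ l ∈ p, langFirst d c ks = some l) →
    ((rest.foldl (fun (st : String × Int × PySem.Set Char) lang =>
        let owned := PySem.Set.diff
          (PySem.Set.inter W0 (PySem.Set.ofList (d.getD lang "").toList)) st.2.2
        let claimed := PySem.Set.union st.2.2 owned
        if PySem.Set.len owned > st.2.1 then (lang, PySem.Set.len owned, claimed)
        else (st.1, st.2.1, claimed)) st).1,
     (rest.foldl (fun (st : String × Int × PySem.Set Char) lang =>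
        let owned := PySem.Set.diff
          (PySem.Set.inter W0 (PySem.Set.ofList (d.getD lang "").toList)) st.2.2
        let claimed := PySem.Set.union st.2.2 owned
        if PySem.Set.len owned > st.2.1 then (lang, PySem.Set.len owned, claimed)
        else (st.1, st.2.1, claimed)) st).2.1)
      = rest.foldl
          (pvStep (fun L => (W0.countP (fun c => langFirst d c ks == some L) : Int)))
          (st.1, st.2.1) := by
  intro rest
  induction rest with
  | nil => intro p st _ _; rfl
  | cons L rest' ih =>
      intro p st hsplit hcl
      have howned : PySem.Set.diff
          (PySem.Set.inter W0 (PySem.Set.ofList (d.getD L "").toList)) st.2.2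
          = W0.filter (fun c => langFirst d c ks == some L) := by
        simp only [PySem.Set.diff, PySem.Set.inter, List.filter_filter]
        apply List.filter_congr
        intro c hc
        rw [Bool.and_comm]
        exact owned_char d ks p rest' L hks hsplit st.2.2 W0 hcl c hc
      have hlen : PySem.Set.len (PySem.Set.diff
          (PySem.Set.inter W0 (PySem.Set.ofList (d.getD L "").toList)) st.2.2)
          = ((W0.countP (fun c => langFirst d c ks == some L) : Nat) : Int) := by
        rw [howned, List.countP_eq_length_filter]
        rfl
      simp only [List.foldl_cons]
      rw [show (L :: rest' : List String) = [L] ++ rest' from rfl] at hsplit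
      rw [← List.append_assoc] at hsplit
      by_cases hgt : PySem.Set.len (PySem.Set.diff
          (PySem.Set.inter W0 (PySem.Set.ofList (d.getD L "").toList)) st.2.2) > st.2.1
      · have hstep : pvStep (fun L => (W0.countP (fun c => langFirst d c ks == some L) : Int))
            (st.1, st.2.1) L
            = (L, ((W0.countP (fun c => langFirst d c ks == some L) : Nat) : Int)) := by
          unfold pvStep
          have hgt' : (fun L => ((W0.countP (fun c => langFirst d c ks == some L) : Nat) : Int)) L > (st.1, st.2.1).2 := by
            show ((W0.countP (fun c => langFirst d c ks == some L) : Nat) : Int) > st.2.1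
            rw [← hlen]; exact hgt
          rw [if_pos hgt']
        rw [hstep]
        simp only [hgt, if_pos]
        rw [hlen]
        refine ih (p ++ [L]) _ hsplit ?_
        intro c
        simp only [PySem.Set.union, PySem.Set.mem_update, howned, List.mem_filter, hcl]
        constructor
        · rintro (⟨hw, l, hl, hfl⟩ | ⟨hw, hfl⟩)
          · exact ⟨hw, l, by simp [hl], hfl⟩
          · exact ⟨hw, L, by simp, by simpa using hfl⟩
        · rintro ⟨hw, l, hl, hfl⟩
          simp only [List.mem_append, List.mem_singleton] at hl
          rcases hl with hl | rfl
          · exact Or.inl ⟨hw, l, hl, hfl⟩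
          · exact Or.inr ⟨hw, by simpa using hfl⟩
      · have hstep : pvStep (fun L => (W0.countP (fun c => langFirst d c ks == some L) : Int))
            (st.1, st.2.1) L = (st.1, st.2.1) := by
          unfold pvStep
          have hgt' : ¬ ((fun L => ((W0.countP (fun c => langFirst d c ks == some L) : Nat) : Int)) L > (st.1, st.2.1).2) := by
            show ¬ (((W0.countP (fun c => langFirst d c ks == some L) : Nat) : Int) > st.2.1)
            rw [← hlen]; exact hgt
          rw [if_neg hgt']
        rw [hstep]
        simp only [hgt, if_false]
        refine ih (p ++ [L]) _ hsplit ?_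
        intro c
        simp only [PySem.Set.union, PySem.Set.mem_update, howned, List.mem_filter, hcl]
        constructor
        · rintro (⟨hw, l, hl, hfl⟩ | ⟨hw, hfl⟩)
          · exact ⟨hw, l, by simp [hl], hfl⟩
          · exact ⟨hw, L, by simp, by simpa using hfl⟩
        · rintro ⟨hw, l, hl, hfl⟩
          simp only [List.mem_append, List.mem_singleton] at hl
          rcases hl with hl | rfl
          · exact Or.inl ⟨hw, l, hl, hfl⟩
          · exact Or.inr ⟨hw, by simpa using hfl⟩

-- best-scan skips zero-count languages
theorem pvStep_fold_filter (g : String → Int) (hg : ∀ L, 0 ≤ g L) :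
    ∀ (l : List String) (s : String × Int), 0 ≤ s.2 →
    l.foldl (pvStep g) s = (l.filter (fun L => decide (0 < g L))).foldl (pvStep g) s := by
  intro l
  induction l with
  | nil => intro s _; rfl
  | cons L l ih =>
      intro s hs
      simp only [List.foldl_cons, List.filter_cons]
      by_cases hL : 0 < g L
      · simp only [hL, decide_true]
        apply ih
        unfold pvStep; split_ifs with h
        · exact hg L
        · exact hs
      · have : ¬ (g L > s.2) := by omega
        simp only [hL, decide_false]
        rw [show pvStep g s L = s from by unfold pvStep; simp [this]]
        exact ih s hs

-- Python max(key=…) as a fold threaded through 'some': the first element seeds the scan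
theorem max?_fold : ∀ (ps : List (String × Int)) (m : String × Int),
    PySem.List.max? (m :: ps) (fun x => x.2)
      = some (ps.foldl (fun s p => if s.2 < p.2 then p else s) m) := by
  intro ps
  induction ps with
  | nil => intro m; rfl
  | cons p ps ih =>
      intro m
      have h1 : PySem.List.max? (m :: p :: ps) (fun x => x.2)
          = PySem.List.max? ((if m.2 < p.2 then p else m) :: ps) (fun x => x.2) := by
        simp only [PySem.List.max?, List.foldl_cons]
        by_cases h : m.2 < p.2 <;> simp [h]
      rw [h1, ih]
      simp only [List.foldl_cons]


-- building a set from a filtered list = filtering the set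
theorem ofList_filter (q : Char → Bool) (xs : List Char) :
    PySem.Set.ofList (xs.filter q) = (PySem.Set.ofList xs).filter q := by
  have key : ∀ (xs s : List Char),
      (xs.filter q).foldl PySem.Set.add (s.filter q) = (xs.foldl PySem.Set.add s).filter q := by
    intro xs
    induction xs with
    | nil => intro s; rfl
    | cons x xs ih =>
        intro s
        by_cases hq : q x
        · have hadd : PySem.Set.add (List.filter q s) x = List.filter q (PySem.Set.add s x) := by
            simp only [PySem.Set.add, PySem.Set.contains, List.contains_eq_mem, List.mem_filter]
            by_cases hs : x ∈ s
            · simp [hs, hq]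
            · simp [hs, hq, List.filter_append]
          simp only [List.filter_cons, hq, if_pos, List.foldl_cons]
          rw [hadd]
          exact ih (PySem.Set.add s x)
        · have hskip : List.filter q (PySem.Set.add s x) = List.filter q s := by
            simp only [PySem.Set.add, PySem.Set.contains, List.contains_eq_mem]
            by_cases hs : x ∈ s
            · simp [hs]
            · simp [hs, List.filter_append, hq]
          simp only [List.filter_cons, hq, if_neg, Bool.false_eq_true, not_false_iff,
            List.foldl_cons]
          rw [show (List.foldl PySem.Set.add (PySem.Set.add s x) xs).filter q
              = (xs.filter q).foldl PySem.Set.add ((PySem.Set.add s x).filter q) from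
              (ih (PySem.Set.add s x)).symm, hskip]
  simpa using key xs []

-- abstraction both ports are reduced to
def pvD (languages : List (String × String)) : PySem.Dict String String :=
  PySem.Dict.ofList languages
def pvKs (languages : List (String × String)) : List String :=
  PySem.List.sorted (pvD languages).keys (fun x => x) false
def pvCount (word : String) (languages : List (String × String)) (L : String) : Nat :=
  (PySem.Set.ofList word.toList).countP
    (fun c => langFirst (pvD languages) c (pvKs languages) == some L)
def pvBest (word : String) (languages : List (String × String)) : String :=
  ((pvKs languages).foldl
    (pvStep (fun L => (pvCount word languages L : Int))) ("", 0)).1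

theorem B_eq (word : String) (languages : List (String × String)) :
    language_alt word languages = pvBest word languages := by
  unfold language_alt pvBest pvCount pvKs pvD
  have hks : (PySem.List.sorted (PySem.Dict.ofList languages).keys (fun x => x) false).Nodup :=
    ((PySem.List.sorted_perm (PySem.Dict.ofList languages).keys (fun x => x) false).nodup_iff).mpr
      (PySem.Dict.nodup_keys_ofList languages)
  have h := alt_fold_eq (PySem.Dict.ofList languages) (PySem.Set.ofList word.toList)
      (PySem.List.sorted (PySem.Dict.ofList languages).keys (fun x => x) false) hks
      (PySem.List.sorted (PySem.Dict.ofList languages).keys (fun x => x) false) []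
      ("", 0, PySem.Set.empty) rfl (by intro c; simp [PySem.Set.empty])
  exact congrArg Prod.fst h


theorem counts_fold (items : List (Char × String)) :
    items.foldl (fun (lu : PySem.Dict String Int) p =>
      if lu.contains p.2 then lu.insert p.2 (lu.getD p.2 0 + 1) else lu.insert p.2 1)
      PySem.Dict.empty
    = (items.map (fun p => p.2)).foldl
        (fun d x => d.insert x (d.getD x 0 + 1)) PySem.Dict.empty := by
  rw [List.foldl_map]
  apply PySem.List.foldl_congr_mem
  intro acc p _
  by_cases hc : acc.contains p.2
  · simp [hc]
  · have h0 : acc.getD p.2 0 = 0 :=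
      PySem.Dict.getD_of_not_contains acc 0 (by simpa using hc)
    simp [hc, h0]

theorem counter_items (vals : List String) :
    (vals.foldl (fun d x => d.insert x (d.getD x 0 + 1)) PySem.Dict.empty).items
    = (PySem.Set.ofList vals).map (fun L => (L, (vals.count L : Int))) := by
  rw [PySem.Dict.foldl_insert_getD_add_one_eq_counter]
  exact PySem.Dict.items_counter vals

theorem letters_items (d : PySem.Dict String String) (ks : List String) (w : List Char) :
    (w.foldl (fun lt c => match langFirst d c ks with
        | some lang => lt.insert c lang
        | none => lt) PySem.Dict.empty).items
    = (PySem.Set.ofList (w.filter (fun c => (langFirst d c ks).isSome))).map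
        (fun c => (c, (langFirst d c ks).getD "")) := by
  have hcong : w.foldl (fun lt c => match langFirst d c ks with
        | some lang => lt.insert c lang | none => lt) PySem.Dict.empty
      = w.foldl (fun lt c => if (langFirst d c ks).isSome then
          lt.insert c ((langFirst d c ks).getD "") else lt) PySem.Dict.empty := by
    apply PySem.List.foldl_congr_mem
    intro acc c _
    cases h : langFirst d c ks <;> simp
  rw [hcong, PySem.List.foldl_if_eq_foldl_filter]
  have h := items_foldl_insert_fun (fun c => (langFirst d c ks).getD "")
    (w.filter (fun c => (langFirst d c ks).isSome)) [] List.nodup_nil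
  simpa [PySem.Set.update, PySem.Set.ofList, PySem.Set.empty, PySem.Dict.empty] using h

theorem A_abs (d : PySem.Dict String String) (ks : List String)
    (hnd : ks.Nodup) (hsort : ks.Pairwise (· < ·)) (w : List Char) :
    (if (PySem.List.sorted2 ((
        (w.foldl (fun lt c => match langFirst d c ks with
          | some lang => lt.insert c lang | none => lt) PySem.Dict.empty).items.foldl
          (fun (lu : PySem.Dict String Int) p => if lu.contains p.2 then
            lu.insert p.2 (lu.getD p.2 0 + 1) else lu.insert p.2 1)
          PySem.Dict.empty).items) (fun x => x.1) (fun x => x.2) false) ≠ [] then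
      match PySem.List.max? (PySem.List.sorted2 ((
        (w.foldl (fun lt c => match langFirst d c ks with
          | some lang => lt.insert c lang | none => lt) PySem.Dict.empty).items.foldl
          (fun (lu : PySem.Dict String Int) p => if lu.contains p.2 then
            lu.insert p.2 (lu.getD p.2 0 + 1) else lu.insert p.2 1)
          PySem.Dict.empty).items) (fun x => x.1) (fun x => x.2) false) (fun x => x.2) with
      | some p => p.1
      | none => ""
    else "")
    = (ks.foldl (pvStep (fun L =>
        ((PySem.Set.ofList w).countP (fun c => langFirst d c ks == some L) : Int)))
        ("", 0)).1 := by
  rw [letters_items d ks w]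
  rw [counts_fold, counter_items]
  simp only [List.map_map]
  generalize hvals : List.map ((fun p => p.2) ∘ fun c => (c, (langFirst d c ks).getD ""))
      (PySem.Set.ofList (List.filter (fun c => (langFirst d c ks).isSome) w)) = vals
  -- the two count functions agree
  have hcnt : ∀ L, List.countP (fun c => langFirst d c ks == some L) (PySem.Set.ofList w)
      = vals.count L := by
    intro L
    rw [← hvals, List.count_eq_countP, List.countP_map, ofList_filter, List.countP_filter]
    apply List.countP_congr
    intro c _
    cases hc : langFirst d c ks <;> simp [hc, Function.comp]
  have hg : (fun L => (List.countP (fun c => langFirst d c ks == some L)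
        (PySem.Set.ofList w) : Int)) = (fun L => ((vals.count L : Nat) : Int)) :=
    funext fun L => by rw [hcnt]
  rw [hg]
  -- sorted2 by (name, count) = sorted by name: names are distinct
  have hsep : ∀ x ∈ (PySem.Set.ofList vals).map (fun L => (L, (vals.count L : Int))),
      ∀ y ∈ (PySem.Set.ofList vals).map (fun L => (L, (vals.count L : Int))),
      x.1 = y.1 → x = y := by
    intro x hx y hy hxy
    obtain ⟨a, _, rfl⟩ := List.mem_map.mp hx
    obtain ⟨b, _, rfl⟩ := List.mem_map.mp hy
    simp only at hxy
    subst hxy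
    rfl
  rw [sorted2_eq_sorted _ _ _ hsep]
  -- identify the sorted list
  have hLmem : ∀ L, L ∈ vals ↔ L ∈ ks ∧ 0 < vals.count L := by
    intro L
    constructor
    · intro hL
      refine ⟨?_, List.count_pos_iff.mpr hL⟩
      rw [← hvals] at hL
      obtain ⟨c, hc, rfl⟩ := List.mem_map.mp hL
      rw [PySem.Set.mem_ofList, List.mem_filter] at hc
      cases hfc : langFirst d c ks with
      | none => rw [hfc] at hc; simp at hc
      | some l =>
          have : l ∈ ks := by
            have := langFirst_eq_find? d c ks ▸ hfc
            exact List.mem_of_find?_eq_some this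
          simpa [Function.comp, hfc] using this
    · intro h
      exact List.count_pos_iff.mp h.2
  have hys : PySem.List.sorted ((PySem.Set.ofList vals).map (fun L => (L, (vals.count L : Int))))
        (fun x => x.1) false
      = (ks.filter (fun L => decide (0 < vals.count L))).map
          (fun L => (L, (vals.count L : Int))) := by
    apply PySem.List.sorted_eq_of_perm_of_pairwise_lt
    · rw [List.perm_ext_iff_of_nodup]
      · intro a
        simp only [List.mem_map, List.mem_filter, PySem.Set.mem_ofList, decide_eq_true_eq]
        constructor
        · rintro ⟨L, ⟨hk, hpos⟩, rfl⟩
          exact ⟨L, (hLmem L).mpr ⟨hk, hpos⟩, rfl⟩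
        · rintro ⟨L, hL, rfl⟩
          exact ⟨L, (hLmem L).mp hL, rfl⟩
      · refine List.Nodup.map_on ?_ (List.Nodup.filter _ hnd)
        intro x _ y _ hxy
        simpa using congrArg Prod.fst hxy
      · refine List.Nodup.map_on ?_ (PySem.Set.nodup_ofList vals)
        intro x _ y _ hxy
        simpa using congrArg Prod.fst hxy
    · rw [List.pairwise_map]
      exact (List.Pairwise.filter _ hsort).imp (fun h => h)
  rw [hys]
  -- the best-scan ignores zero-count languages
  rw [pvStep_fold_filter _ (fun L => Int.natCast_nonneg _) ks ("", 0) (le_refl 0)]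
  have hfc : (fun L => decide (0 < ((vals.count L : Nat) : Int)))
      = (fun L => decide (0 < vals.count L)) := funext fun L => by simp
  rw [hfc]
  -- fold over languages = fold over (language, count) pairs
  have hrd : ∀ (ps : List String) (s : String × Int),
      ps.foldl (pvStep (fun L => ((vals.count L : Nat) : Int))) s
      = (ps.map (fun L => (L, (vals.count L : Int)))).foldl
          (fun s p => if s.2 < p.2 then p else s) s := by
    intro ps s
    rw [List.foldl_map]
    apply PySem.List.foldl_congr_mem
    intro acc L _
    rfl
  rw [hrd]
  -- case on whether any language is used
  cases hF : ks.filter (fun L => decide (0 < vals.count L)) with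
  | nil => simp
  | cons L t =>
      have hLpos : 0 < vals.count L := by
        have : L ∈ ks.filter (fun L => decide (0 < vals.count L)) := by
          rw [hF]; exact List.mem_cons_self
        simpa using (List.mem_filter.mp this).2
      simp only [List.map_cons, ne_eq, reduceCtorEq, not_false_iff, if_true]
      rw [max?_fold]
      simp only [List.foldl_cons]
      rw [if_pos (by simpa using hLpos : ((("" : String), (0 : Int)) : String × Int).2 < ((L, (vals.count L : Int)) : String × Int).2)]

theorem A_eq (word : String) (languages : List (String × String)) :
    language word languages = pvBest word languages := by
  have hnd : (pvKs languages).Nodup :=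
    ((PySem.List.sorted_perm (pvD languages).keys (fun x => x) false).nodup_iff).mpr
      (PySem.Dict.nodup_keys_ofList languages)
  have hsort : (pvKs languages).Pairwise (· < ·) := by
    have hle := PySem.List.sorted_pairwise (pvD languages).keys (fun x => x)
    exact (hle.and hnd).imp (fun h => lt_of_le_of_ne h.1 h.2)
  have h := A_abs (pvD languages) (pvKs languages) hnd hsort word.toList
  simp only [pvD, pvKs] at h
  unfold language pvBest pvCount pvKs pvD
  dsimp only
  exact h

-- ===== VERDICT (by name: the statement is the Claim_ definition above) =====
theorem language_spec : Claim_equal_language := by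
  intro word languages _
  unfold Spec_language
  rw [A_eq, B_eq]
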